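-- pv_equiv track=rewrite | github.com/magickakao/genshin-calculator | new_bin/import_weapons2.py | shift_number
-- ===== SOURCE A (Python) =====
-- def shift_number(text: str):
--     if not text:
--         return ('', '')
--     result = ''
--
--     if text[0] in '01234567890.,':
--         while text and text[0] in '01234567890.,':
--             result += text[0]
--             text = text[1:]
--     else:
--         while text and text[0] not in '01234567890.,':
--             result += text[0]
--             text = text[1:]
--
--     return result, text
-- ===== SOURCE B (Python) =====
-- from itertools import takewhile
--
-- def shift_number(text: str):
--     if not text:
--         return ('', '')
--     first = text[0] in '0123456789.,'
--     head = ''.join(takewhile(lambda c: (c in '0123456789.,') == first, text))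
--     return head, text[len(head):]
-- ===== Notes on version B (the rewrite author's own statement) =====
-- stated objective: idiomatic
-- what changed: Replaces the explicit while-loop that grows the result by one char and re-slices the remainder each step with itertools.takewhile over the fixed class predicate followed by a single slice at the prefix length.
import Mathlib
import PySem

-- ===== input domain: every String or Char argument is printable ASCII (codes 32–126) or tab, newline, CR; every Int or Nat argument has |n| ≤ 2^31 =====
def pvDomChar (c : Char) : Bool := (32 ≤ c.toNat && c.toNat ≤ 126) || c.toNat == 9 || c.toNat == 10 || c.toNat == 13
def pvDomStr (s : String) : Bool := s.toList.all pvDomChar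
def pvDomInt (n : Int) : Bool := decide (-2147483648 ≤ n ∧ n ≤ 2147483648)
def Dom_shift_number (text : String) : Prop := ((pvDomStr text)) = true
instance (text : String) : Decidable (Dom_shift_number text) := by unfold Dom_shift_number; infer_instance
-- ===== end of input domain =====

-- B replaces A's char-by-char while-loop (string concat + re-slicing) with takeWhile on the
-- fixed class predicate followed by one slice at the prefix length (idiomatic; same result).


-- ===== PORT A =====
-- membership test "c in '01234567890.,'" (single char in a literal string)
def pvInNum (c : Char) : Bool := "01234567890.,".toList.contains c

-- the first while-loop: while text and text[0] in '…': result += text[0]; text = text[1:]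
def pvLoopIn : List Char → List Char → List Char × List Char
  | acc, [] => (acc, [])
  | acc, c :: rest => if pvInNum c then pvLoopIn (acc ++ [c]) rest else (acc, c :: rest)

-- the second while-loop: while text and text[0] not in '…': …
def pvLoopOut : List Char → List Char → List Char × List Char
  | acc, [] => (acc, [])
  | acc, c :: rest => if !pvInNum c then pvLoopOut (acc ++ [c]) rest else (acc, c :: rest)

def shift_number (text : String) : String × String :=
  match text.toList with
  | [] => ("", "")
  | c :: _ =>
    if pvInNum c then
      let p := pvLoopIn [] text.toList
      (String.mk p.1, String.mk p.2)
    else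
      let p := pvLoopOut [] text.toList
      (String.mk p.1, String.mk p.2)

-- ===== PORT B =====
def shift_number_alt (text : String) : String × String :=
  match text.toList with
  | [] => ("", "")
  | c :: _ =>
    let first := pvInNum c
    let head := text.toList.takeWhile (fun ch => pvInNum ch == first)
    (String.mk head, String.mk (text.toList.drop head.length))

-- ===== PRECONDITION & SPEC =====
def Spec_shift_number (text : String) (out : String × String) : Prop := out = shift_number_alt text
instance (text : String) (out : String × String) : Decidable (Spec_shift_number text out) := by unfold Spec_shift_number; infer_instance

-- ===== CLAIM (what is proved, stated in full; the proofs are below) =====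
def Claim_equal_shift_number : Prop := ∀ (text : String), Dom_shift_number text → Spec_shift_number text (shift_number text)

-- ===== LEMMAS AND PROOFS =====
theorem pvLoopIn_eq (l acc : List Char) :
    pvLoopIn acc l = (acc ++ l.takeWhile pvInNum, l.dropWhile pvInNum) := by
  induction l generalizing acc with
  | nil => simp [pvLoopIn]
  | cons c rest ih =>
    by_cases h : pvInNum c = true
    · simp [pvLoopIn, List.takeWhile, List.dropWhile, h, ih]
    · simp [pvLoopIn, List.takeWhile, List.dropWhile, h]

theorem pvLoopOut_eq (l acc : List Char) :
    pvLoopOut acc l = (acc ++ l.takeWhile (fun c => !pvInNum c), l.dropWhile (fun c => !pvInNum c)) := by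
  induction l generalizing acc with
  | nil => simp [pvLoopOut]
  | cons c rest ih =>
    by_cases h : pvInNum c = true
    · simp [pvLoopOut, List.takeWhile, List.dropWhile, h]
    · simp [pvLoopOut, List.takeWhile, List.dropWhile, h, ih]

theorem pvDrop_takeWhile (p : Char → Bool) (l : List Char) :
    l.drop (l.takeWhile p).length = l.dropWhile p := by
  induction l with
  | nil => rfl
  | cons c rest ih =>
    by_cases h : p c = true
    · simp [List.takeWhile, List.dropWhile, h, ih]
    · simp [List.takeWhile, List.dropWhile, h]

-- ===== VERDICT (by name: the statement is the Claim_ definition above) =====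
theorem shift_number_spec : Claim_equal_shift_number := by
  unfold Claim_equal_shift_number
  intro text _
  unfold Spec_shift_number shift_number shift_number_alt
  cases hl : text.toList with
  | nil => simp
  | cons c rest =>
    by_cases h : pvInNum c = true
    · simp only [h, if_true]
      rw [pvLoopIn_eq, pvDrop_takeWhile]
      simp [h]
    · simp only [h]
      rw [pvLoopOut_eq, pvDrop_takeWhile]
      have : (fun ch => pvInNum ch == pvInNum c) = (fun ch => !pvInNum ch) := by
        funext ch; have hf : pvInNum c = false := by simpa using h
        simp [hf]
      simp [this]
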